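-- pv_equiv track=rewrite | github.com/gka0903/Coding_Test | 문제/신호등고치기.py | solution
-- ===== SOURCE A (Python) =====
-- def solution(n, k, b, arr):
--     answer = 0
--     status = [1] * n
--
--     for i in arr:
--         status[i - 1] = 0
--
--     s, e, bcount, mincount = 0, 0, 0, 0
--
--     while e < k:
--         if status[e] == 0:
--             bcount += 1
--         e += 1
--     mincount = bcount
--
--     while e < n:
--         if status[e] == 0:
--             bcount += 1
--         if status[s] == 0:
--             bcount -= 1
--         mincount = min(bcount, mincount)
--         s += 1
--         e += 1
--
--     answer = mincount
--
--     return answer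
-- ===== SOURCE B (Python) =====
-- def solution(n, k, b, arr):
--     status = [1] * n
--     for i in arr:
--         status[i - 1] = 0
--     pre = [0]
--     for x in status:
--         pre.append(pre[-1] + (x == 0))
--     return min(pre[i + k] - pre[i] for i in range(n - k + 1))
-- ===== Notes on version B (the rewrite author's own statement) =====
-- stated objective: alternative
-- what changed: Keeps the status-array build but replaces A's two incremental sliding-window while-loops with a prefix-sum array of broken counts and a direct min over the window differences pre[i+k]-pre[i].
-- outside the precondition, e.g. on solution(2, -1, 0, []): A returns 0, B raises IndexError; on solution(-3, 0, 0, []): A returns 0, B raises ValueError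
import Mathlib
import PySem

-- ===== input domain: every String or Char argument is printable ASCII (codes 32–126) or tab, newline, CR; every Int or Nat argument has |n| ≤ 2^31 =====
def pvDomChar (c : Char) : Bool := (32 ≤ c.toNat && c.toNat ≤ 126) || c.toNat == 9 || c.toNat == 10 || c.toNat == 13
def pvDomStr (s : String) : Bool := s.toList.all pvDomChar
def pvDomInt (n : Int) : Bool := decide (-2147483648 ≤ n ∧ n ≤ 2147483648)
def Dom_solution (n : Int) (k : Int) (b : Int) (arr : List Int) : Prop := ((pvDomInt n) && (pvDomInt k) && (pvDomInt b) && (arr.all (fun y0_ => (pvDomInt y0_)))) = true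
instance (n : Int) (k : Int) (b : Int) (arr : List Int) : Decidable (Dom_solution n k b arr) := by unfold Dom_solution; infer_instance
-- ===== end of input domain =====

-- B keeps A's status-array build but replaces the two incremental sliding-window while-loops
-- by a prefix-sum array of broken counts and a direct minimum over pre[i+k]-pre[i];
-- same cost, different decomposition (objective: alternative).

-- ===== PORT A =====
-- 'status[i-1] = 0' is pySetD (Python's negative-index rule; Pre_ keeps every written index in range).
-- 'status[e]'/'status[s]' become pyGetD with default 1 (Pre_ keeps them in range, where Python would raise).
-- After 'while e < k' the counter e equals max k 0, where the second while resumes.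
def solution (n : Int) (k : Int) (b : Int) (arr : List Int) : Int :=
  let status0 : List Int := List.replicate n.toNat 1
  let status : List Int := arr.foldl (fun st i => PySem.List.pySetD st (i - 1) 0) status0
  -- while e < k: count the first window's broken signals
  let bcount : Int := (PySem.List.pyRange 0 k 1).foldl
      (fun bc e => if PySem.List.pyGetD status e 1 = 0 then bc + 1 else bc) 0
  let mincount : Int := bcount
  -- while e < n: slide the window, state (s, bcount, mincount)
  let res := (PySem.List.pyRange (max k 0) n 1).foldl
      (fun (st : Int × Int × Int) e =>
        let bc1 := if PySem.List.pyGetD status e 1 = 0 then st.2.1 + 1 else st.2.1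
        let bc2 := if PySem.List.pyGetD status st.1 1 = 0 then bc1 - 1 else bc1
        (st.1 + 1, bc2, min bc2 st.2.2))
      (0, bcount, mincount)
  res.2.2

-- ===== PORT B =====
-- same status build as A; 'pre[-1]' is pyGetD with index -1; '(x == 0)' added to an int is
-- an if 1/0; min() of the (nonempty under Pre_) window list is min?.
def solution_alt (n : Int) (k : Int) (b : Int) (arr : List Int) : Int :=
  let status0 : List Int := List.replicate n.toNat 1
  let status : List Int := arr.foldl (fun st i => PySem.List.pySetD st (i - 1) 0) status0
  let pre : List Int := status.foldl
      (fun p x => p ++ [PySem.List.pyGetD p (-1) 0 + (if x = 0 then 1 else 0)]) [0]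
  let vals : List Int := (PySem.List.pyRange 0 (n - k + 1) 1).map
      (fun i => PySem.List.pyGetD pre (i + k) 0 - PySem.List.pyGetD pre i 0)
  (PySem.List.min? vals (fun x => x)).getD 0

-- ===== PRECONDITION & SPEC =====
-- Pre_ excludes the inputs where A raises IndexError (k > n with 0 ≤ n, or an arr entry outside
-- Python's index range 1-n..n for status) and the degenerate corners k < 0, and n < 0 with arr = [],
-- where A's returned 0 is leftover loop state and B's min() has no valid windows and raises.
def Pre_solution (n : Int) (k : Int) (b : Int) (arr : List Int) : Prop :=
  0 ≤ k ∧ k ≤ n ∧ ∀ i ∈ arr, 1 - n ≤ i ∧ i ≤ n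
instance (n : Int) (k : Int) (b : Int) (arr : List Int) : Decidable (Pre_solution n k b arr) := by
  unfold Pre_solution; infer_instance
def pvWitness_solution : Int × Int × Int × List Int := (5, 2, 0, [1, 3, 4])

def Spec_solution (n : Int) (k : Int) (b : Int) (arr : List Int) (out : Int) : Prop := out = solution_alt n k b arr
instance (n : Int) (k : Int) (b : Int) (arr : List Int) (out : Int) : Decidable (Spec_solution n k b arr out) := by unfold Spec_solution; infer_instance

-- ===== CLAIM (what is proved, stated in full; the proofs are below) =====
def Claim_equal_solution : Prop := ∀ (n : Int) (k : Int) (b : Int) (arr : List Int), Dom_solution n k b arr → Pre_solution n k b arr → Spec_solution n k b arr (solution n k b arr)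

-- ===== LEMMAS AND PROOFS =====

-- number of positions 1..j whose signal is broken, for an abstract broken test c
def pvP (c : Int → Bool) (j : Int) : Int :=
  ((PySem.List.pyRange 1 (j + 1) 1).countP c : Int)

-- broken count of the window of size k starting at position i
def pvW (c : Int → Bool) (k i : Int) : Int := pvP c (i + k) - pvP c i

-- running minimum of pvW over window starts 0..t
def pvM (c : Int → Bool) (k : Int) : Nat → Int
  | 0 => pvW c k 0
  | t + 1 => min (pvW c k (t + 1)) (pvM c k t)

lemma pvP_nonpos (c : Int → Bool) (j : Int) (h : j ≤ 0) : pvP c j = 0 := by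
  unfold pvP
  rw [PySem.List.pyRange_one_eq_nil (by omega)]
  rfl

lemma pvP_succ (c : Int → Bool) (j : Int) (h : 0 ≤ j) :
    pvP c (j + 1) = pvP c j + (if c (j + 1) then 1 else 0) := by
  unfold pvP
  rw [show j + 1 + 1 = (j + 1) + 1 from rfl,
    PySem.List.pyRange_one_succ_right (by omega : (1:Int) ≤ j + 1),
    List.countP_append]
  by_cases h' : c (j + 1) <;> simp [h']

lemma pyGetD_all_eq {α : Type} (xs : List α) (d : α) (h : ∀ x ∈ xs, x = d) (j : Int) :
    PySem.List.pyGetD xs j d = d := by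
  unfold PySem.List.pyGetD PySem.List.pyGet? PySem.List.pyIdx?
  have key : ∀ m : Nat, xs[m]?.getD d = d := by
    intro m
    rcases hx : xs[m]? with _ | v
    · simp
    · simpa using h v (List.mem_of_getElem? hx)
  split_ifs <;> simp [key]

-- Python's negative-index assignment, resolved to List.set
lemma pySetD_neg {α : Type} (xs : List α) (i : Int) (v : α)
    (h1 : -(xs.length : Int) ≤ i) (h2 : i < 0) :
    PySem.List.pySetD xs i v = xs.set (i + xs.length).toNat v := by
  unfold PySem.List.pySetD PySem.List.pySet? PySem.List.pyIdx?
  rw [if_neg (by omega), if_pos h1]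
  simp only [Option.map_some, Option.getD_some]
  congr 1
  omega

-- A's status array after the zeroing loop: position j is zeroed iff some arr entry names it,
-- directly (j+1) or through Python's negative-index wraparound (j+1-n)
lemma status_foldl_get (n : Int) (l : List Int) (st0 : List Int)
    (h0 : st0.length = n.toNat) (hn : 0 ≤ n) (hl : ∀ i ∈ l, 1 - n ≤ i ∧ i ≤ n) :
    (l.foldl (fun st i => PySem.List.pySetD st (i - 1) 0) st0).length = n.toNat ∧
    ∀ j : Int, 0 ≤ j → j < n →
      PySem.List.pyGetD (l.foldl (fun st i => PySem.List.pySetD st (i - 1) 0) st0) j 1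
        = if ((j + 1) ∈ l ∨ (j + 1 - n) ∈ l) then 0 else PySem.List.pyGetD st0 j 1 := by
  induction l generalizing st0 with
  | nil => simp [h0]
  | cons i l ih =>
    obtain ⟨hi1, hi2⟩ := hl i (by simp)
    -- the effective index Python writes to
    have hset : ∃ m : Nat, m < st0.length ∧
        PySem.List.pySetD st0 (i - 1) 0 = PySem.List.pySetD st0 ((m : Nat) : Int) 0 ∧
        ∀ j : Int, 0 ≤ j → j < n → ((j.toNat = m) ↔ (i = j + 1 ∨ i = j + 1 - n)) := by
      by_cases hc : 1 ≤ i
      · refine ⟨(i - 1).toNat, by omega, ?_, ?_⟩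
        · rw [show ((((i - 1).toNat : Nat)) : Int) = i - 1 from by omega]
        · intro j hj0 hjn; omega
      · refine ⟨(i - 1 + n).toNat, by omega, ?_, ?_⟩
        · rw [pySetD_neg st0 (i - 1) 0 (by omega) (by omega),
            PySem.List.pySetD_natCast]
          congr 1
          omega
        · intro j hj0 hjn; omega
    obtain ⟨m, hm, hrw, hiff⟩ := hset
    have hlen : (PySem.List.pySetD st0 (i - 1) 0).length = n.toNat := by
      rw [PySem.List.length_pySetD, h0]
    obtain ⟨L, G⟩ := ih (PySem.List.pySetD st0 (i - 1) 0) hlen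
      (fun x hx => hl x (by simp [hx]))
    refine ⟨by simpa using L, fun j hj0 hjn => ?_⟩
    rw [List.foldl_cons] at *
    rw [G j hj0 hjn, hrw, show j = ((j.toNat : Nat) : Int) from by omega,
      PySem.List.pyGetD_pySetD_natCast st0 m j.toNat 0 1 hm]
    have hiff' := hiff j hj0 hjn
    rw [show (((j.toNat : Nat)) : Int) = j from by omega]
    simp only [List.mem_cons]
    by_cases hA : (j + 1) ∈ l <;> by_cases hB : (j + 1 - n) ∈ l <;>
      by_cases hm' : j.toNat = m <;>
      simp [hA, hB, hm', eq_comm, hiff'.symm] <;> tauto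
  termination_by l.length

-- the zero-counting fold over a range of in-bounds indices is a difference of prefix counts
lemma count_fold (n : Int) (c : Int → Bool) (status : List Int)
    (hst : ∀ j : Int, 0 ≤ j → j < n →
      PySem.List.pyGetD status j 1 = if c (j + 1) then 0 else 1)
    (a : Int) (t : Nat) (ha : 0 ≤ a) (hub : a + t ≤ n) (x : Int) :
    (PySem.List.pyRange a (a + t) 1).foldl
        (fun bc e => if PySem.List.pyGetD status e 1 = 0 then bc + 1 else bc) x
      = x + (pvP c (a + t) - pvP c a) := by
  induction t with
  | zero =>
    rw [show a + ((0:Nat):Int) = a from by omega, PySem.List.pyRange_one_eq_nil (le_refl a)]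
    simp
  | succ t ih =>
    rw [show ((t + 1 : Nat) : Int) = (t : Int) + 1 from by push_cast; ring] at *
    rw [show a + ((t:Int) + 1) = (a + t) + 1 from by ring,
      PySem.List.pyRange_one_succ_right (by omega : a ≤ a + t),
      List.foldl_append, ih (by omega)]
    simp only [List.foldl_cons, List.foldl_nil]
    rw [hst (a + t) (by omega) (by omega), pvP_succ c (a + t) (by omega)]
    by_cases hm : c (a + (t:Int) + 1) <;> simp [hm] <;> ring

-- A's sliding loop state after t iterations: (t, current window count, running minimum)
lemma slide_fold (n k : Int) (c : Int → Bool) (status : List Int)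
    (hst : ∀ j : Int, 0 ≤ j → j < n →
      PySem.List.pyGetD status j 1 = if c (j + 1) then 0 else 1)
    (hk : 0 ≤ k) (t : Nat) (hub : k + t ≤ n) :
    (PySem.List.pyRange k (k + t) 1).foldl
        (fun (st : Int × Int × Int) e =>
          let bc1 := if PySem.List.pyGetD status e 1 = 0 then st.2.1 + 1 else st.2.1
          let bc2 := if PySem.List.pyGetD status st.1 1 = 0 then bc1 - 1 else bc1
          (st.1 + 1, bc2, min bc2 st.2.2))
        (0, pvW c k 0, pvW c k 0)
      = ((t : Int), pvW c k t, pvM c k t) := by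
  induction t with
  | zero =>
    rw [show k + ((0:Nat):Int) = k from by omega, PySem.List.pyRange_one_eq_nil (le_refl k)]
    simp [pvM]
  | succ t ih =>
    rw [show ((t + 1 : Nat) : Int) = (t : Int) + 1 from by push_cast; ring] at *
    rw [show k + ((t:Int) + 1) = (k + t) + 1 from by ring,
      PySem.List.pyRange_one_succ_right (by omega : k ≤ k + t),
      List.foldl_append, ih (by omega)]
    simp only [List.foldl_cons, List.foldl_nil]
    rw [hst (k + t) (by omega) (by omega), hst t (by omega) (by omega)]
    have hW : pvW c k ((t:Int) + 1)
        = pvW c k t + (if c (k + (t:Int) + 1) then 1 else 0)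
          - (if c ((t:Int) + 1) then 1 else 0) := by
      unfold pvW
      rw [show (t:Int) + 1 + k = (k + t) + 1 from by ring,
        pvP_succ c (k + t) (by omega), pvP_succ c t (by omega)]
      ring_nf
    by_cases h1 : c (k + (t:Int) + 1) <;> by_cases h2 : c ((t:Int) + 1) <;>
      simp [h1, h2, pvM, hW] <;> ring_nf

lemma pyGetD_concat_neg_one {α : Type} (xs : List α) (y : α) (d : α) :
    PySem.List.pyGetD (xs ++ [y]) (-1) d = y := by
  simp [PySem.List.pyGetD, PySem.List.pyGet?, PySem.List.pyIdx?]

-- B's prefix list over the (characterised) status array is the map of pvP over 0..t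
lemma pre_fold (c : Int → Bool) (t : Nat) :
    (((PySem.List.pyRange 0 (t : Int) 1).map (fun j => if c (j + 1) then (0:Int) else 1)).foldl
        (fun p x => p ++ [PySem.List.pyGetD p (-1) 0 + (if x = 0 then 1 else 0)]) [0])
      = (PySem.List.pyRange 0 ((t : Int) + 1) 1).map (fun j => pvP c j) := by
  induction t with
  | zero =>
    simp only [Nat.cast_zero]
    rw [PySem.List.pyRange_one_eq_nil (le_refl 0),
      show PySem.List.pyRange 0 (0 + 1) 1 = [0] from rfl]
    simp [pvP_nonpos c 0 (le_refl 0)]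
  | succ t ih =>
    rw [show ((t + 1 : Nat) : Int) = (t : Int) + 1 from by push_cast; ring] at *
    rw [PySem.List.pyRange_one_succ_right (by omega : (0:Int) ≤ (t:Int)),
      PySem.List.pyRange_one_succ_right (by omega : (0:Int) ≤ (t:Int) + 1),
      List.map_append, List.foldl_append, ih]
    simp only [List.foldl_cons, List.foldl_nil, List.map_append, List.map_cons, List.map_nil]
    congr 1
    have hlast : (PySem.List.pyRange 0 ((t:Int) + 1) 1).map (fun j => pvP c j)
        = ((PySem.List.pyRange 0 (t:Int) 1).map (fun j => pvP c j)) ++ [pvP c t] := by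
      rw [PySem.List.pyRange_one_succ_right (by omega : (0:Int) ≤ (t:Int)), List.map_append]
      simp
    rw [hlast, pyGetD_concat_neg_one, pvP_succ c t (by omega)]
    by_cases hm : c ((t:Int) + 1) <;> simp [hm]

-- folding min over the remaining window counts gives the running minimum
lemma min_fold (c : Int → Bool) (k : Int) (t : Nat) :
    ((PySem.List.pyRange 1 ((t : Int) + 1) 1).map (fun i => pvW c k i)).foldl min (pvW c k 0)
      = pvM c k t := by
  induction t with
  | zero =>
    rw [PySem.List.pyRange_one_eq_nil (by norm_num)]
    simp [pvM]
  | succ t ih =>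
    rw [show ((t + 1 : Nat) : Int) = (t : Int) + 1 from by push_cast; ring] at *
    rw [show (t:Int) + 1 + 1 = ((t:Int) + 1) + 1 from rfl,
      PySem.List.pyRange_one_succ_right (by omega : (1:Int) ≤ (t:Int) + 1),
      List.map_append, List.foldl_append, ih]
    simp [pvM, min_comm]

-- ===== VERDICT (by name: the statement is the Claim_ definition above) =====
theorem solution_spec : Claim_equal_solution := by
  intro n k b arr hdom hpre
  obtain ⟨hk0, hkn, harr⟩ := hpre
  have hn : 0 ≤ n := le_trans hk0 hkn
  unfold Spec_solution
  obtain ⟨hLen, hGet⟩ := status_foldl_get n arr (List.replicate n.toNat 1) (by simp) hn harr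
  set c : Int → Bool := fun t => decide (t ∈ arr ∨ t - n ∈ arr) with hc
  set status : List Int := arr.foldl (fun st i => PySem.List.pySetD st (i - 1) 0)
    (List.replicate n.toNat (1:Int)) with hstatus
  have hst : ∀ j : Int, 0 ≤ j → j < n →
      PySem.List.pyGetD status j 1 = if c (j + 1) then 0 else 1 := by
    intro j h1 h2
    have hg := hGet j h1 h2
    rw [pyGetD_all_eq _ _ (fun x hx => List.eq_of_mem_replicate hx) j] at hg
    rw [hstatus, hg, hc]
    by_cases hm : (j + 1) ∈ arr ∨ (j + 1 - n) ∈ arr <;> simp [hm]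
  have hA : solution n k b arr = pvM c k (n - k).toNat := by
    simp only [solution, ← hstatus]
    have hcnt := count_fold n c status hst 0 k.toNat (le_refl 0) (by omega) 0
    rw [show (0:Int) + ((k.toNat : Nat) : Int) = k from by omega] at hcnt
    have h0 : (0:Int) + (pvP c k - pvP c 0) = pvW c k 0 := by
      unfold pvW
      rw [zero_add, pvP_nonpos c 0 (le_refl 0)]
      ring_nf
    rw [hcnt, h0, show max k 0 = k from by omega]
    have hs := slide_fold n k c status hst hk0 (n - k).toNat (by omega)
    rw [show k + (((n - k).toNat : Nat) : Int) = n from by omega] at hs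
    rw [hs]
  have hB : solution_alt n k b arr = pvM c k (n - k).toNat := by
    simp only [solution_alt, ← hstatus]
    have hmap : status = (PySem.List.pyRange 0 n 1).map (fun j => if c (j + 1) then (0:Int) else 1) := by
      apply List.ext_getElem
      · simp [hLen, PySem.List.length_pyRange_one]
      · intro m hm1 hm2
        have hm' : (m : Int) < n := by
          have := hm1
          rw [hLen] at this
          omega
        have hp := hst (m : Int) (by omega) hm'
        rw [PySem.List.pyGetD_natCast] at hp
        rw [List.getD_eq_getElem _ _ hm1] at hp
        rw [hp]
        rw [List.getElem_map, PySem.List.getElem_pyRange_one]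
        simp
    have hp := pre_fold c n.toNat
    rw [show ((n.toNat : Nat) : Int) = n from by omega] at hp
    rw [hmap, hp]
    have hvals : (PySem.List.pyRange 0 (n - k + 1) 1).map
        (fun i => PySem.List.pyGetD ((PySem.List.pyRange 0 (n + 1) 1).map (fun j => pvP c j)) (i + k) 0
          - PySem.List.pyGetD ((PySem.List.pyRange 0 (n + 1) 1).map (fun j => pvP c j)) i 0)
        = (PySem.List.pyRange 0 (n - k + 1) 1).map (fun i => pvW c k i) := by
      apply List.map_congr_left
      intro i hi
      rw [PySem.List.mem_pyRange_one] at hi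
      rw [PySem.List.pyGetD_map_pyRange_of_nonneg _ _ _ _ (by omega) (by omega),
        PySem.List.pyGetD_map_pyRange_of_nonneg _ _ _ _ (by omega) (by omega)]
      rfl
    rw [hvals,
      PySem.List.pyRange_one_cons (by omega : (0:Int) < n - k + 1),
      show (0:Int) + 1 = 1 from rfl, List.map_cons,
      PySem.List.min?_id_cons]
    have hm := min_fold c k (n - k).toNat
    rw [show (((n - k).toNat : Nat) : Int) = n - k from by omega] at hm
    rw [Option.getD_some, hm]
  rw [hA, hB]
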